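-- pv_equiv track=rewrite | github.com/Zionett/DataIncProject | customTransformers.py | removeNumbers
-- ===== SOURCE A (Python) =====
-- import string
--
-- def removeNumbers(words):
--     newList = []
--     for word in words:
--         flag = 0
--         for c in string.digits:
--             if c in word:
--                 flag = 1
--                 break
--         if flag == 0:
--             newList.append(word)
--     return newList
-- ===== SOURCE B (Python) =====
-- import string
--
-- _DELETE_DIGITS = str.maketrans('', '', string.digits)
--
-- def removeNumbers(words):
--     # pass 1: delete every digit character from every word via a translation table
--     stripped = [w.translate(_DELETE_DIGITS) for w in words]
--     # pass 2: a word had no digit iff deletion did not shorten it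
--     return [w for w, s in zip(words, stripped) if len(s) == len(w)]
-- ===== Notes on version B (the rewrite author's own statement) =====
-- stated objective: alternative
-- what changed: Instead of detecting digits (A scans the word for each of the ten digit substrings with a flag-and-break loop), B works in two staged passes: it first deletes all digit characters from every word with a str.translate deletion table, then keeps a word iff the deletion did not change its length.
import Mathlib
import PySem

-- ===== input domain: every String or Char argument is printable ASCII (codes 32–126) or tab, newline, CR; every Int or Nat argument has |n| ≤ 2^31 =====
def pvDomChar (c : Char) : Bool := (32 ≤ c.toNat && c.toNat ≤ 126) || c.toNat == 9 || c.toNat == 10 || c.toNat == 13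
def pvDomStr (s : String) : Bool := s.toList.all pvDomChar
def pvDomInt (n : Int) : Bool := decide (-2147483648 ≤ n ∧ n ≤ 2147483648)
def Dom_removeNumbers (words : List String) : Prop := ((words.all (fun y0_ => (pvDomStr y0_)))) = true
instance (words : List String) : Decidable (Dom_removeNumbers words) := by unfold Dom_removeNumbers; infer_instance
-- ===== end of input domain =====

-- B deletes all digit characters from every word (a translation-table pass) and keeps a word iff its length is unchanged, instead of A's flag-and-break scan for each of the ten digit substrings; same return values.


-- ===== PORT A =====
-- inner loop 'for c in string.digits: if c in word: flag = 1; break' returning flag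
def digitFlag : List Char → String → Int
  | [], _ => 0
  | c :: cs, word => if PySem.Str.isIn (String.ofList [c]) word then 1 else digitFlag cs word

def removeNumbers (words : List String) : List String :=
  words.foldl (fun newList word =>
    if digitFlag "0123456789".toList word = 0 then newList ++ [word] else newList) []

-- ===== PORT B =====
-- w.translate(_DELETE_DIGITS): delete every character that is one of the ten digits
def pvStripDigits (w : String) : String :=
  String.ofList (w.toList.filter (fun c => !("0123456789".toList.contains c)))

def removeNumbers_alt (words : List String) : List String :=
  let stripped := words.map pvStripDigits
  ((words.zip stripped).filter (fun p => PySem.Str.len p.2 == PySem.Str.len p.1)).map Prod.fst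

-- ===== PRECONDITION & SPEC =====
def Spec_removeNumbers (words : List String) (out : List String) : Prop := out = removeNumbers_alt words
instance (words : List String) (out : List String) : Decidable (Spec_removeNumbers words out) := by unfold Spec_removeNumbers; infer_instance

-- ===== CLAIM (what is proved, stated in full; the proofs are below) =====
def Claim_equal_removeNumbers : Prop := ∀ (words : List String), Dom_removeNumbers words → Spec_removeNumbers words (removeNumbers words)

-- ===== LEMMAS AND PROOFS =====
theorem digitFlag_eq_zero_iff (ds : List Char) (w : String) :
    digitFlag ds w = 0 ↔ ∀ c ∈ ds, c ∉ w.toList := by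
  induction ds with
  | nil => simp [digitFlag]
  | cons c cs ih =>
    have hiff : PySem.Str.isIn (String.ofList [c]) w = true ↔ c ∈ w.toList := by
      rw [PySem.Str.isIn_iff_infix]; simp [List.singleton_infix_iff]
    simp only [digitFlag]
    by_cases h : PySem.Str.isIn (String.ofList [c]) w = true
    · rw [if_pos h]
      constructor
      · intro h0; exact absurd h0 one_ne_zero
      · intro hall; exact absurd (hiff.mp h) (hall c (List.mem_cons_self ..))
    · have hc : c ∉ w.toList := fun hm => h (hiff.mpr hm)
      rw [if_neg h, ih]
      simp [hc]

-- B's per-word test: deletion keeps the length iff no digit occurs in the word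
theorem strip_len_iff (w : String) :
    (PySem.Str.len (pvStripDigits w) == PySem.Str.len w) = true ↔
      ∀ c ∈ "0123456789".toList, c ∉ w.toList := by
  simp only [pvStripDigits, PySem.Str.len_eq, beq_iff_eq, Nat.cast_inj, String.toList_ofList]
  constructor
  · intro hlen c hc hw
    have hfe : (w.toList.filter (fun c => !("0123456789".toList.contains c))) = w.toList :=
      List.filter_sublist.eq_of_length hlen
    have h2 := (List.mem_filter.mp (hfe ▸ hw)).2
    simp only [List.contains_eq_mem, Bool.not_eq_eq_eq_not, Bool.not_true,
      decide_eq_false_iff_not] at h2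
    exact h2 hc
  · intro h
    rw [List.filter_eq_self.mpr]
    intro a ha
    simp only [List.contains_eq_mem, Bool.not_eq_eq_eq_not, Bool.not_true,
      decide_eq_false_iff_not]
    exact fun hd => h a hd ha
theorem zip_map_filter_fst {α β : Type} (f : α → β) (q : α → β → Bool) (l : List α) :
    ((l.zip (l.map f)).filter (fun p => q p.1 p.2)).map Prod.fst
      = l.filter (fun w => q w (f w)) := by
  induction l with
  | nil => rfl
  | cons x xs ih =>
    simp only [List.map_cons, List.zip_cons_cons, List.filter_cons]
    by_cases h : q x (f x) = true <;> simp [h, ih]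

-- ===== VERDICT (by name: the statement is the Claim_ definition above) =====
theorem removeNumbers_spec : Claim_equal_removeNumbers := by
  intro words _
  unfold Spec_removeNumbers removeNumbers removeNumbers_alt
  rw [show (fun newList word =>
        if digitFlag "0123456789".toList word = 0 then newList ++ [word] else newList)
      = (fun (acc : List String) (word : String) =>
        if decide (digitFlag "0123456789".toList word = 0) = true then acc ++ [(fun x => x) word] else acc)
    from by funext acc word; simp]
  rw [PySem.List.foldl_append_if]
  simp only [List.map_id_fun', id, List.nil_append]
  rw [zip_map_filter_fst pvStripDigits (fun w s => PySem.Str.len s == PySem.Str.len w) words]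
  congr 1
  funext w
  rw [Bool.eq_iff_iff, decide_eq_true_eq]
  exact (digitFlag_eq_zero_iff "0123456789".toList w).trans (strip_len_iff w).symm
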